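-- pv_equiv track=rewrite | github.com/SolTB/Bio331 | B331_Lab6.py | count_FFL
-- ===== SOURCE A (Python) =====
-- import itertools
--
-- def count_FFL(nodelist,edgelist):
-- 	InDict = {} #list of in neighbors of a node
-- 	OutDict = {} #list of out neighbors of a node
-- 	AllNDict = {} #dictionary of all in and out neighbors of a node
--
-- 	for node in nodelist:
-- 		OutList = []
-- 		InList = []
-- 		for edge in edgelist:
-- 			if edge[0] == node: #if its the starting node
-- 				OutList.append(edge[1]) #adding second node to list of out neighbors
-- 			elif edge[1] == node: #if its the receiving node
-- 				InList.append(edge[0]) #adding first node to list of in neighbors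
-- 		InDict[node] = InList
-- 		OutDict[node] = OutList
-- 		AllNList = InList + OutList
-- 		AllNDict[node] = AllNList
--
-- 	triples = itertools.combinations(nodelist,3)
-- 	FFL_Count = 0
-- 	for item in triples:
-- 		A = item[0]
-- 		AN = AllNDict[A] #all neighbors of A
-- 		B = item[1]
-- 		BN = AllNDict[B] #all neighbors of B
-- 		C = item[2]
-- 		CN = AllNDict[C] #all neighbors of C
-- 		if B in AN and C in AN and B in CN: #if B and C are neighbors of A and B is a neighbor of C (ie edges exist between all)
-- 			if C in OutDict[A]: #if there exists A->C
-- 				if B in OutDict[A]: #if there exists A->B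
-- 					FFL_Count = FFL_Count + 1
-- 			elif C in OutDict[B]: #if there exists B->C
-- 				if A in OutDict[B]: #if there exists B->A
-- 					FFL_Count = FFL_Count + 1
-- 			elif B in OutDict[C]: #if there exists C->B
-- 				if A in OutDict[C]: #if there exists C->A
-- 					FFL_Count = FFL_Count + 1
-- 	return FFL_Count
-- ===== SOURCE B (Python) =====
-- def count_FFL(nodelist, edgelist):
--     E = set(edgelist)
--
--     def linked(x, y):
--         return (x, y) in E or (y, x) in E
--
--     def oriented(a, b, c):
--         if (a, c) in E:
--             return (a, b) in E
--         if (b, c) in E: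
--             return (b, a) in E
--         if (c, b) in E:
--             return (c, a) in E
--         return False
--
--     total = 0
--     t1 = nodelist
--     while t1:
--         a, t1 = t1[0], t1[1:]
--         nb = [v for v in t1 if linked(v, a)]
--         t2 = nb
--         while t2:
--             b, t2 = t2[0], t2[1:]
--             for c in t2:
--                 if linked(b, c) and oriented(a, b, c):
--                     total += 1
--     return total
-- ===== Notes on version B (the rewrite author's own statement) =====
-- stated objective: faster
-- what changed: B drops A's per-node scan over all edges and its three neighbor-list dictionaries: it builds one edge set once, restricts each suffix to the neighbors of the first node before pairing, and decides every test by O(1) set membership instead of O(deg) list scans over itertools triples.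
import Mathlib
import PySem

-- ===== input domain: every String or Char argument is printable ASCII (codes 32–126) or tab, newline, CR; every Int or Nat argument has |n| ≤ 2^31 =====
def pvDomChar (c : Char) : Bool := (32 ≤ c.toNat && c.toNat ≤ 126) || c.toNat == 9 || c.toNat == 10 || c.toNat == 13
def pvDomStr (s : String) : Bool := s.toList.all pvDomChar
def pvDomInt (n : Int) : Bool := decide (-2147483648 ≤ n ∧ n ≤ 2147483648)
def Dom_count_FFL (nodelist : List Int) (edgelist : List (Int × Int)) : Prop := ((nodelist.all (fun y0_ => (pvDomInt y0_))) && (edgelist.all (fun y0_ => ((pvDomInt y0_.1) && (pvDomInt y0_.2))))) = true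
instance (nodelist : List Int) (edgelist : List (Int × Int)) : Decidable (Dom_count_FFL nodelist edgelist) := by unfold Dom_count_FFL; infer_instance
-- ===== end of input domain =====

-- B replaces A's dict-of-neighbor-lists construction and itertools triples by one edge set,
-- O(1) membership tests, and suffix loops restricted to neighbors of the first node (objective: faster).


-- ===== PORT A =====
-- the inner 'for edge in edgelist' loop of A: returns (OutList, InList) of a node
def pvInOut (node : Int) (edgelist : List (Int × Int)) : List Int × List Int :=
  edgelist.foldl (fun st e =>
    if e.1 == node then (st.1 ++ [e.2], st.2)
    else if e.2 == node then (st.1, st.2 ++ [e.1])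
    else st) ([], [])

-- the 'for node in nodelist' loop of A building (InDict, OutDict, AllNDict)
def pvStep (edgelist : List (Int × Int))
    (d : PySem.Dict Int (List Int) × PySem.Dict Int (List Int) × PySem.Dict Int (List Int))
    (node : Int) :
    PySem.Dict Int (List Int) × PySem.Dict Int (List Int) × PySem.Dict Int (List Int) :=
  let p := pvInOut node edgelist
  (d.1.insert node p.2, d.2.1.insert node p.1, d.2.2.insert node (p.2 ++ p.1))

def count_FFL (nodelist : List Int) (edgelist : List (Int × Int)) : Int :=
  let ds := nodelist.foldl (pvStep edgelist) (PySem.Dict.empty, PySem.Dict.empty, PySem.Dict.empty)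
  let OutDict := ds.2.1
  let AllNDict := ds.2.2
  (PySem.List.combinations nodelist 3).foldl (fun cnt item =>
    let A := PySem.List.pyGetD item 0 0
    let AN := AllNDict.getD A []
    let B := PySem.List.pyGetD item 1 0
    let _BN := AllNDict.getD B []   -- Python computes BN but never uses it
    let C := PySem.List.pyGetD item 2 0
    let CN := AllNDict.getD C []
    if AN.contains B && AN.contains C && CN.contains B then
      if (OutDict.getD A []).contains C then
        (if (OutDict.getD A []).contains B then cnt + 1 else cnt)
      else if (OutDict.getD B []).contains C then
        (if (OutDict.getD B []).contains A then cnt + 1 else cnt)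
      else if (OutDict.getD C []).contains B then
        (if (OutDict.getD C []).contains A then cnt + 1 else cnt)
      else cnt
    else cnt) 0

-- ===== PORT B =====
def ffLinked (E : PySem.Set (Int × Int)) (x y : Int) : Bool :=
  PySem.Set.contains E (x, y) || PySem.Set.contains E (y, x)

def ffOriented (E : PySem.Set (Int × Int)) (a b c : Int) : Bool :=
  if PySem.Set.contains E (a, c) then PySem.Set.contains E (a, b)
  else if PySem.Set.contains E (b, c) then PySem.Set.contains E (b, a)
  else if PySem.Set.contains E (c, b) then PySem.Set.contains E (c, a)
  else false

-- innermost 'for c in t2'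
def ffInner (E : PySem.Set (Int × Int)) (a b : Int) (t2 : List Int) (acc : Int) : Int :=
  t2.foldl (fun acc c =>
    if ffLinked E b c && ffOriented E a b c then acc + 1
    else acc) acc

-- middle 'while t2' (over the neighbors-of-a sublist)
def ffLoop2 (E : PySem.Set (Int × Int)) (a : Int) : List Int → Int → Int
  | [], acc => acc
  | b :: t2, acc => ffLoop2 E a t2 (ffInner E a b t2 acc)

-- outer 'while t1'; 'nb = [v for v in t1 if linked(v, a)]'
def ffLoop1 (E : PySem.Set (Int × Int)) : List Int → Int → Int
  | [], acc => acc
  | a :: t1, acc => ffLoop1 E t1 (ffLoop2 E a (t1.filter (fun v => ffLinked E v a)) acc)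

def count_FFL_alt (nodelist : List Int) (edgelist : List (Int × Int)) : Int :=
  ffLoop1 (PySem.Set.ofList edgelist) nodelist 0

-- ===== PRECONDITION & SPEC =====
def Spec_count_FFL (nodelist : List Int) (edgelist : List (Int × Int)) (out : Int) : Prop := out = count_FFL_alt nodelist edgelist
instance (nodelist : List Int) (edgelist : List (Int × Int)) (out : Int) : Decidable (Spec_count_FFL nodelist edgelist out) := by unfold Spec_count_FFL; infer_instance

-- ===== CLAIM (what is proved, stated in full; the proofs are below) =====
def Claim_equal_count_FFL : Prop := ∀ (nodelist : List Int) (edgelist : List (Int × Int)), Dom_count_FFL nodelist edgelist → Spec_count_FFL nodelist edgelist (count_FFL nodelist edgelist)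

-- ===== LEMMAS AND PROOFS =====

theorem pvInOut_gen (node : Int) (es : List (Int × Int)) (o i : List Int) :
    es.foldl (fun st e =>
      if e.1 == node then (st.1 ++ [e.2], st.2)
      else if e.2 == node then (st.1, st.2 ++ [e.1])
      else st) (o, i) =
      (o ++ (es.filter (fun e => e.1 == node)).map (·.2),
       i ++ (es.filter (fun e => !(e.1 == node) && e.2 == node)).map (·.1)) := by
  induction es generalizing o i with
  | nil => simp
  | cons e t ih =>
    cases h1 : (e.1 == node) <;> cases h2 : (e.2 == node) <;>
      simp only [List.foldl_cons, h1, h2, Bool.false_eq_true, if_true,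
        if_false, List.filter_cons, Bool.not_true, Bool.not_false,
        Bool.false_and, Bool.true_and, List.map_cons] <;>
      rw [ih] <;> simp

theorem pvInOut_eq (node : Int) (es : List (Int × Int)) :
    pvInOut node es =
      ((es.filter (fun e => e.1 == node)).map (·.2),
       (es.filter (fun e => !(e.1 == node) && e.2 == node)).map (·.1)) := by
  show List.foldl _ ([], []) es = _
  rw [pvInOut_gen node es [] []]; simp

theorem mem_pvInOut_fst (node y : Int) (es : List (Int × Int)) :
    y ∈ (pvInOut node es).1 ↔ (node, y) ∈ es := by
  rw [pvInOut_eq]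
  simp only [List.mem_map, List.mem_filter]
  constructor
  · rintro ⟨e, ⟨he, h1⟩, rfl⟩
    simp at h1; rwa [← h1]
  · intro h; exact ⟨(node, y), ⟨h, by simp⟩, rfl⟩

theorem mem_pvInOut_snd (node y : Int) (es : List (Int × Int)) :
    y ∈ (pvInOut node es).2 ↔ (y, node) ∈ es ∧ y ≠ node := by
  rw [pvInOut_eq]
  simp only [List.mem_map, List.mem_filter]
  constructor
  · rintro ⟨e, ⟨he, h1⟩, rfl⟩
    simp [Bool.and_eq_true] at h1
    obtain ⟨hne, h2⟩ := h1
    constructor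
    · rwa [show (e.1, node) = e from by rw [← h2]]
    · simpa using hne
  · rintro ⟨h, hne⟩; exact ⟨(y, node), ⟨h, by simp [hne]⟩, rfl⟩

-- the triple-dict fold splits into three independent insert folds
theorem pvDicts_proj (es : List (Int × Int)) (nl : List Int)
    (d1 d2 d3 : PySem.Dict Int (List Int)) :
    nl.foldl (pvStep es) (d1, d2, d3) =
      (nl.foldl (fun d n => d.insert n (pvInOut n es).2) d1,
       nl.foldl (fun d n => d.insert n (pvInOut n es).1) d2,
       nl.foldl (fun d n => d.insert n ((pvInOut n es).2 ++ (pvInOut n es).1)) d3) := by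
  induction nl generalizing d1 d2 d3 with
  | nil => rfl
  | cons n t ih => simp only [List.foldl_cons, pvStep]; rw [ih]

theorem getD_foldl_insert_fn_not_mem (f : Int → List Int) (l : List Int) (x : Int)
    (d : PySem.Dict Int (List Int)) (v : List Int) (hx : x ∉ l) :
    (l.foldl (fun d n => d.insert n (f n)) d).getD x v = d.getD x v := by
  induction l generalizing d with
  | nil => rfl
  | cons y t ih =>
    simp only [List.mem_cons, not_or] at hx
    rw [List.foldl_cons, ih _ hx.2, PySem.Dict.getD_insert_of_ne _ _ _ hx.1]

theorem getD_foldl_insert_fn_mem (f : Int → List Int) (l : List Int) (x : Int)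
    (d : PySem.Dict Int (List Int)) (v : List Int) (hx : x ∈ l) :
    (l.foldl (fun d n => d.insert n (f n)) d).getD x v = f x := by
  induction l generalizing d with
  | nil => cases hx
  | cons y t ih =>
    rw [List.foldl_cons]
    by_cases h : x ∈ t
    · exact ih _ h
    · have hxy : x = y := by rcases List.mem_cons.mp hx with h' | h'; exact h'; exact absurd h' h
      rw [getD_foldl_insert_fn_not_mem _ _ _ _ _ h, hxy, PySem.Dict.getD_insert_self]

-- A's boolean tests, rewritten to B's edge-set tests
theorem contains_out_eq (es : List (Int × Int)) (x y : Int) :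
    ((pvInOut x es).1.contains y) = PySem.Set.contains (PySem.Set.ofList es) (x, y) := by
  rw [Bool.eq_iff_iff]
  simp [PySem.Set.mem_ofList, mem_pvInOut_fst]

theorem contains_allN_eq (es : List (Int × Int)) (x y : Int) :
    (((pvInOut x es).2 ++ (pvInOut x es).1).contains y) = ffLinked (PySem.Set.ofList es) y x := by
  rw [Bool.eq_iff_iff]
  simp only [ffLinked, Bool.or_eq_true, PySem.Set.contains_iff, PySem.Set.mem_ofList,
    List.contains_eq_mem, List.mem_append, decide_eq_true_eq,
    mem_pvInOut_fst, mem_pvInOut_snd]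
  by_cases h : y = x
  · subst h; tauto
  · tauto

-- pure if-chain reshaping
theorem ifchain_eq (x1 x2 x3 o1 p1 o2 p2 o3 p3 : Bool) (cnt : Int) :
    (if x1 && x2 && x3 then
      (if o1 then (if p1 then cnt + 1 else cnt)
       else if o2 then (if p2 then cnt + 1 else cnt)
       else if o3 then (if p3 then cnt + 1 else cnt)
       else cnt)
     else cnt)
    = (if x1 && x2 && x3 && (if o1 then p1 else if o2 then p2 else if o3 then p3 else false)
       then cnt + 1 else cnt) := by
  cases x1 <;> cases x2 <;> cases x3 <;> cases o1 <;> cases p1 <;> cases o2 <;> cases p2 <;>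
    cases o3 <;> cases p3 <;> simp

-- B's test on a 3-element list
def ffTrip (E : PySem.Set (Int × Int)) : List Int → Bool
  | [a, b, c] => ffLinked E b a && ffLinked E c a && ffLinked E b c && ffOriented E a b c
  | _ => false

theorem ffTrip_cons (E : PySem.Set (Int × Int)) (a b c : Int) :
    ffTrip E [a, b, c] =
      (ffLinked E b a && ffLinked E c a && (ffLinked E b c && ffOriented E a b c)) := by
  simp [ffTrip, Bool.and_assoc]

theorem ffInner_eq (E : PySem.Set (Int × Int)) (a b : Int) (s : List Int) (acc : Int) :
    ffInner E a b s acc =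
      acc + (s.countP (fun c => ffLinked E b c && ffOriented E a b c) : Int) := by
  unfold ffInner
  rw [PySem.List.foldl_count_if]

theorem countP_filter_ffTrip (E : PySem.Set (Int × Int)) (a b : Int) (t : List Int)
    (hb : ffLinked E b a = true) :
    (t.filter (fun v => ffLinked E v a)).countP (fun c => ffLinked E b c && ffOriented E a b c)
      = t.countP (fun c => ffTrip E [a, b, c]) := by
  rw [List.countP_filter]
  apply List.countP_congr
  intro c _
  rw [ffTrip_cons, hb]
  cases ffLinked E c a <;> cases ffLinked E b c <;> cases ffOriented E a b c <;> simp

theorem countP_ffTrip_false (E : PySem.Set (Int × Int)) (a b : Int) (t : List Int)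
    (hb : ffLinked E b a = false) :
    t.countP (fun c => ffTrip E [a, b, c]) = 0 := by
  apply List.countP_eq_zero.mpr
  intro c _
  rw [ffTrip_cons, hb]
  simp

theorem ffLoop2_eq (E : PySem.Set (Int × Int)) (a : Int) (t : List Int) (acc : Int) :
    ffLoop2 E a (t.filter (fun v => ffLinked E v a)) acc =
      acc + ((PySem.List.combinations t 2).countP (fun pr => ffTrip E (a :: pr)) : Int) := by
  induction t generalizing acc with
  | nil => simp [ffLoop2]
  | cons b t ih =>
    have hsplit : (PySem.List.combinations (b :: t) 2).countP (fun pr => ffTrip E (a :: pr))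
        = t.countP (fun c => ffTrip E [a, b, c])
          + (PySem.List.combinations t 2).countP (fun pr => ffTrip E (a :: pr)) := by
      rw [show (2 : Nat) = 1 + 1 from rfl, PySem.List.combinations_cons_succ,
        List.countP_append, List.countP_map, PySem.List.combinations_one, List.countP_map]
      rfl
    rw [hsplit]
    cases hb : ffLinked E b a with
    | true =>
      rw [show List.filter (fun v => ffLinked E v a) (b :: t)
            = b :: List.filter (fun v => ffLinked E v a) t from by simp [hb],
        ffLoop2, ffInner_eq, ih, countP_filter_ffTrip E a b t hb]
      push_cast
      ring
    | false =>
      rw [show List.filter (fun v => ffLinked E v a) (b :: t)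
            = List.filter (fun v => ffLinked E v a) t from by simp [hb],
        ih, countP_ffTrip_false E a b t hb]
      push_cast
      ring

theorem ffLoop1_eq (E : PySem.Set (Int × Int)) (l : List Int) (acc : Int) :
    ffLoop1 E l acc = acc + ((PySem.List.combinations l 3).countP (ffTrip E) : Int) := by
  induction l generalizing acc with
  | nil => simp [ffLoop1]
  | cons a t ih =>
    have hsplit : (PySem.List.combinations (a :: t) 3).countP (ffTrip E)
        = (PySem.List.combinations t 2).countP (fun pr => ffTrip E (a :: pr))
          + (PySem.List.combinations t 3).countP (ffTrip E) := by
      rw [show (3 : Nat) = 2 + 1 from rfl, PySem.List.combinations_cons_succ,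
        List.countP_append, List.countP_map]
      rfl
    rw [ffLoop1, ih, ffLoop2_eq, hsplit]
    push_cast
    ring

-- ===== VERDICT (by name: the statement is the Claim_ definition above) =====
theorem count_FFL_spec : Claim_equal_count_FFL := by
  intro nl es _
  unfold Spec_count_FFL count_FFL count_FFL_alt
  rw [ffLoop1_eq, pvDicts_proj]
  rw [← PySem.List.foldl_count_if (ffTrip (PySem.Set.ofList es)) (PySem.List.combinations nl 3) 0]
  apply PySem.List.foldl_congr_mem
  intro cnt item hitem
  obtain ⟨hsub, hlen⟩ := (PySem.List.mem_combinations_iff nl 3 item).mp hitem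
  rcases item with _ | ⟨a, _ | ⟨b, _ | ⟨c, _ | ⟨d, t⟩⟩⟩⟩ <;> simp at hlen
  have ha : a ∈ nl := hsub.subset (by simp)
  have hb : b ∈ nl := hsub.subset (by simp)
  have hc : c ∈ nl := hsub.subset (by simp)
  have e0 : PySem.List.pyGetD [a, b, c] (0:Int) 0 = a := rfl
  have e1 : PySem.List.pyGetD [a, b, c] (1:Int) 0 = b := rfl
  have e2 : PySem.List.pyGetD [a, b, c] (2:Int) 0 = c := rfl
  simp only [e0, e1, e2,
    getD_foldl_insert_fn_mem _ nl a _ _ ha,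
    getD_foldl_insert_fn_mem _ nl b _ _ hb,
    getD_foldl_insert_fn_mem _ nl c _ _ hc,
    contains_allN_eq, contains_out_eq, ffTrip]
  simp only [ifchain_eq]
  rfl
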